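-- pv_equiv track=rewrite | github.com/sshhaauuooii/DEEIP | Muc34/predatas/text2tag_1.py | docs2sentences
-- ===== SOURCE A (Python) =====
-- def docs2sentences(docs):
--     sentences=[]
--     sentence_flag=['.','!','?']
--
--
--     flag=-1#无引号
--
--     front_id=0
--     for id,char in enumerate(docs):
--         if char=='"':
--             flag=-flag
--             continue
--         if char in sentence_flag:
--             if flag>0:
--                 continue
--             sentences.append(docs[front_id:id+1])
--             front_id=id+1
--
--     return sentences
-- ===== SOURCE B (Python) =====
-- def docs2sentences(docs):
--     # Different structure: no quote flag; a quoted region is skipped atomically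
--     # by an inner scan to its closing quote (or end of string).
--     sentences = []
--     front = 0
--     i = 0
--     n = len(docs)
--     while i < n:
--         c = docs[i]
--         if c == '"':
--             i += 1
--             while i < n and docs[i] != '"':
--                 i += 1
--             i += 1  # past the closing quote (or past the end if unclosed)
--         elif c in '.!?':
--             sentences.append(docs[front:i + 1])
--             front = i + 1
--             i += 1
--         else:
--             i += 1
--     return sentences
-- ===== Notes on version B (the rewrite author's own statement) =====
-- stated objective: alternative
-- what changed: B drops A's toggling quote flag: when it meets an opening quote it skips the whole quoted region atomically with an inner scan to the closing quote (or end of string), so only out-of-quote characters are ever tested for sentence punctuation.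
import Mathlib
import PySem

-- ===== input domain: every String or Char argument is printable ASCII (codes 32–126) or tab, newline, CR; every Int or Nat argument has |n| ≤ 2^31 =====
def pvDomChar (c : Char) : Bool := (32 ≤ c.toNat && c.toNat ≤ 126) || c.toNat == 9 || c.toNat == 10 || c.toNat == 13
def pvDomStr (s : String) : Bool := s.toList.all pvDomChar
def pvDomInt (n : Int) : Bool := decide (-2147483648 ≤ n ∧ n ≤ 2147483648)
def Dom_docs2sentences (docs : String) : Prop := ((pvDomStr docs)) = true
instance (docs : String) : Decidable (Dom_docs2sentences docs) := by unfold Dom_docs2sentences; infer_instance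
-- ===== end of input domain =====

-- B replaces A's toggling quote flag by atomically skipping each quoted region
-- with an inner scan (alternative decomposition, same cost).


-- ===== PORT A =====
-- A's loop: enumerate(docs) with a sign flag toggled at every '"'.
def pvALoop (cl : List Char) : List Char → Int → Nat → Nat → List String → List String
  | [], _, _, _, acc => acc
  | c :: cs, flag, id, front, acc =>
    if c = '"' then pvALoop cl cs (-flag) (id + 1) front acc
    else if c = '.' ∨ c = '!' ∨ c = '?' then
      if flag > 0 then pvALoop cl cs flag (id + 1) front acc
      else pvALoop cl cs flag (id + 1) (id + 1)
        (acc ++ [String.ofList (PySem.List.slice cl (some (front : Int)) (some ((id : Int) + 1)))])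
    else pvALoop cl cs flag (id + 1) front acc

def docs2sentences (docs : String) : List String :=
  pvALoop docs.toList docs.toList (-1) 0 0 []

-- ===== PORT B =====
-- B's inner scan: consume up to and past the next '"'; returns the rest and the index after it.
def pvSkipQ : List Char → Nat → List Char × Nat
  | [], i => ([], i)
  | c :: cs, i => if c = '"' then (cs, i + 1) else pvSkipQ cs (i + 1)

theorem pvSkipQ_length_le (cs : List Char) (i : Nat) : (pvSkipQ cs i).1.length ≤ cs.length := by
  induction cs generalizing i with
  | nil => simp [pvSkipQ]
  | cons c cs ih =>
    simp only [pvSkipQ]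
    split
    · simp
    · exact le_trans (ih (i + 1)) (by simp)

def pvBLoop (cl : List Char) : List Char → Nat → Nat → List String → List String
  | [], _, _, acc => acc
  | c :: cs, i, front, acc =>
    if c = '"' then
      pvBLoop cl (pvSkipQ cs (i + 1)).1 (pvSkipQ cs (i + 1)).2 front acc
    else if c = '.' ∨ c = '!' ∨ c = '?' then
      pvBLoop cl cs (i + 1) (i + 1)
        (acc ++ [String.ofList (PySem.List.slice cl (some (front : Int)) (some ((i : Int) + 1)))])
    else pvBLoop cl cs (i + 1) front acc
  termination_by cs => cs.length
  decreasing_by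
  · exact Nat.lt_succ_of_le (pvSkipQ_length_le cs (i + 1))
  · simp
  · simp

def docs2sentences_alt (docs : String) : List String :=
  pvBLoop docs.toList docs.toList 0 0 []

-- ===== PRECONDITION & SPEC =====
def Spec_docs2sentences (docs : String) (out : List String) : Prop := out = docs2sentences_alt docs
instance (docs : String) (out : List String) : Decidable (Spec_docs2sentences docs out) := by unfold Spec_docs2sentences; infer_instance

-- ===== CLAIM (what is proved, stated in full; the proofs are below) =====
def Claim_equal_docs2sentences : Prop := ∀ (docs : String), Dom_docs2sentences docs → Spec_docs2sentences docs (docs2sentences docs)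

-- ===== LEMMAS AND PROOFS =====

-- Inside quotes A ignores everything until the closing quote: it lands exactly
-- where B's skip helper lands, with the flag back to -1.
theorem pvALoop_inside (cl : List Char) (cs : List Char) (i front : Nat) (acc : List String) :
    pvALoop cl cs 1 i front acc = pvALoop cl (pvSkipQ cs i).1 (-1) (pvSkipQ cs i).2 front acc := by
  induction cs generalizing i with
  | nil => simp [pvSkipQ, pvALoop]
  | cons c cs ih =>
    simp only [pvALoop, pvSkipQ]
    split
    · norm_num
    · split
      · simpa using ih (i + 1)
      · exact ih (i + 1)

theorem pvALoop_eq_pvBLoop (cl : List Char) (cs : List Char) (i front : Nat) (acc : List String) :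
    pvALoop cl cs (-1) i front acc = pvBLoop cl cs i front acc := by
  induction hn : cs.length using Nat.strong_induction_on generalizing cs i front acc with
  | _ n ih =>
    match cs with
    | [] => simp [pvALoop, pvBLoop]
    | c :: cs =>
      simp only [pvALoop, pvBLoop]
      subst hn
      split
      · rw [show -(-1 : Int) = 1 by norm_num, pvALoop_inside]
        exact ih _ (Nat.lt_succ_of_le (pvSkipQ_length_le cs (i + 1))) _ _ _ _ rfl
      · split
        · norm_num
          exact ih _ (Nat.lt_succ_self _) _ _ _ _ rfl
        · exact ih _ (Nat.lt_succ_self _) _ _ _ _ rfl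

-- ===== VERDICT (by name: the statement is the Claim_ definition above) =====
theorem docs2sentences_spec : Claim_equal_docs2sentences := by
  intro docs _
  unfold Spec_docs2sentences docs2sentences docs2sentences_alt
  exact pvALoop_eq_pvBLoop _ _ _ _ _
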